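-- pv_equiv track=rewrite | github.com/isabellaamorim/Teste-de-Python---NAVI | 03.py | grades
-- ===== SOURCE A (Python) =====
-- def grades(notas):
--
--     aluno_notas = {}
--     i = 1
--
--     for nota in notas:
--
--         aluno = str(i)
--
--         aluno_notas[aluno] = nota
--
--         i += 1
--
--     for aluno,nota in aluno_notas.items():
--
--         if nota == max(aluno_notas.values()):
--
--             return 'Aluno: {}, Nota: {}'. format(aluno, nota)
-- ===== SOURCE B (Python) =====
-- def grades(notas):
--     best_aluno = None
--     best_nota = None
--     for i, nota in enumerate(notas, 1):
--         if best_nota is None or nota > best_nota: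
--             best_aluno = str(i)
--             best_nota = nota
--     if best_aluno is None:
--         return None
--     return 'Aluno: {}, Nota: {}'.format(best_aluno, best_nota)
-- ===== Notes on version B (the rewrite author's own statement) =====
-- stated objective: faster
-- what changed: Replaces A's build-a-dict-then-scan-items-recomputing-max(values)-each-step with a single running-maximum pass that keeps the first student whose grade is strictly greater than the best so far.
import Mathlib
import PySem

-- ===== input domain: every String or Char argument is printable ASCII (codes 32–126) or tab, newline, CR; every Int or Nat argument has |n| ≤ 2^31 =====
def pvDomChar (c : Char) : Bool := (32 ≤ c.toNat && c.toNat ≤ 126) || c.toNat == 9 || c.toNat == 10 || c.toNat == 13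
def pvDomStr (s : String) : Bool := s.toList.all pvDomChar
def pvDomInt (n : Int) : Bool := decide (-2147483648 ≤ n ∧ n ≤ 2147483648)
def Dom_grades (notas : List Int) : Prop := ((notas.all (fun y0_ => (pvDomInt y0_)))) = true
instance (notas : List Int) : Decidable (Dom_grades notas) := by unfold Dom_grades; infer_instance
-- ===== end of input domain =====

-- B replaces A's dict-build-then-rescan (recomputing max(values) on every scan step) with a
-- single running-maximum pass; objective: simpler.


-- ===== PORT A =====

-- 'Aluno: {}, Nota: {}'.format(aluno, nota)
def fmtA (aluno : String) (nota : Int) : String :=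
  String.ofList ("Aluno: ".toList ++ aluno.toList ++ ", Nota: ".toList ++ PySem.Int.toChars nota)

-- first loop: aluno_notas[str(i)] = nota; i += 1
def gradesBuild (d : PySem.Dict String Int) (i : Int) : List Int → PySem.Dict String Int
  | [] => d
  | nota :: rest => gradesBuild (d.insert (PySem.Int.toStr i) nota) (i + 1) rest

-- second loop over items, recomputing max(aluno_notas.values()) each iteration.
-- (the 'none' branch of max? is unreachable: it is Python's ValueError on max([]),
-- but values is nonempty whenever the items loop has an element to run on)
def gradesScan (d : PySem.Dict String Int) : List (String × Int) → Option String
  | [] => none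
  | (aluno, nota) :: rest =>
    match PySem.List.max? (PySem.Dict.values d) (fun v => v) with
    | none => none
    | some m => if nota == m then some (fmtA aluno nota) else gradesScan d rest

def grades (notas : List Int) : Option String :=
  let d := gradesBuild PySem.Dict.empty 1 notas
  gradesScan d d.items

-- ===== PORT B =====

def fmtB (aluno : String) (nota : Int) : String :=
  String.ofList ("Aluno: ".toList ++ aluno.toList ++ ", Nota: ".toList ++ PySem.Int.toChars nota)

-- single pass: keep the first student whose grade strictly exceeds the best so far
def gradesAltLoop (best : Option (String × Int)) (i : Int) : List Int → Option (String × Int)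
  | [] => best
  | nota :: rest =>
    match best with
    | none => gradesAltLoop (some (PySem.Int.toStr i, nota)) (i + 1) rest
    | some (a, b) =>
      if b < nota then gradesAltLoop (some (PySem.Int.toStr i, nota)) (i + 1) rest
      else gradesAltLoop (some (a, b)) (i + 1) rest

def grades_alt (notas : List Int) : Option String :=
  match gradesAltLoop none 1 notas with
  | none => none
  | some (a, n) => some (fmtB a n)

-- ===== PRECONDITION & SPEC =====
def Spec_grades (notas : List Int) (out : Option String) : Prop := out = grades_alt notas
instance (notas : List Int) (out : Option String) : Decidable (Spec_grades notas out) := by unfold Spec_grades; infer_instance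

-- ===== CLAIM (what is proved, stated in full; the proofs are below) =====
def Claim_equal_grades : Prop := ∀ (notas : List Int), Dom_grades notas → Spec_grades notas (grades notas)

-- ===== LEMMAS AND PROOFS =====

-- the enumerated pairs [(str i, n₁), (str (i+1), n₂), …]
def enumPairs (i : Int) : List Int → List (String × Int)
  | [] => []
  | n :: r => (PySem.Int.toStr i, n) :: enumPairs (i + 1) r

-- ---- injectivity of str(n) on positive n ----

lemma toDigitsCore_append (b : Nat) : ∀ (f n : Nat) (l : List Char),
    Nat.toDigitsCore b f n l = Nat.toDigitsCore b f n [] ++ l := by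
  intro f
  induction f with
  | zero => intro n l; simp [Nat.toDigitsCore]
  | succ f ih =>
    intro n l
    simp only [Nat.toDigitsCore]
    by_cases h : n / b = 0
    · simp [h]
    · simp only [h, if_false]
      rw [ih (n / b) (Nat.digitChar (n % b) :: l), ih (n / b) [Nat.digitChar (n % b)]]
      simp

lemma toDigitsCore_fuel (b : Nat) (hb : 2 ≤ b) : ∀ (f f' n : Nat), n < f → n < f' →
    Nat.toDigitsCore b f n [] = Nat.toDigitsCore b f' n [] := by
  intro f
  induction f with
  | zero => intro f' n h; omega
  | succ f ih =>
    intro f' n hf hf'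
    cases f' with
    | zero => omega
    | succ f' =>
      simp only [Nat.toDigitsCore]
      by_cases h : n / b = 0
      · simp [h]
      · simp only [h, if_false]
        rw [toDigitsCore_append b f, toDigitsCore_append b f']
        have hn : 0 < n := by
          rcases Nat.eq_zero_or_pos n with h0 | h0
          · exfalso; apply h; simp [h0]
          · exact h0
        have hlt : n / b < n := Nat.div_lt_self hn (by omega)
        rw [ih f' (n / b) (by omega) (by omega)]

lemma toDigits_small {n : Nat} (h : n < 10) : Nat.toDigits 10 n = [Nat.digitChar n] := by
  simp [Nat.toDigits, Nat.toDigitsCore, Nat.div_eq_of_lt h, Nat.mod_eq_of_lt h]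

lemma toDigits_step {n : Nat} (h : 10 ≤ n) :
    Nat.toDigits 10 n = Nat.toDigits 10 (n / 10) ++ [Nat.digitChar (n % 10)] := by
  have h10 : n / 10 ≠ 0 := by omega
  simp only [Nat.toDigits, Nat.toDigitsCore, h10, if_false]
  rw [toDigitsCore_append 10 n]
  congr 1
  exact toDigitsCore_fuel 10 (by omega) n (n / 10 + 1) (n / 10)
    (by omega) (by omega)

def digitsVal (l : List Char) : Nat := l.foldl (fun a c => a * 10 + (c.toNat - 48)) 0

lemma digitsVal_foldl_toDigits : ∀ (n : Nat) (a : Nat),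
    (Nat.toDigits 10 n).foldl (fun a c => a * 10 + (c.toNat - 48)) a =
      a * 10 ^ (Nat.toDigits 10 n).length + n := by
  intro n
  induction n using Nat.strong_induction_on with
  | _ n ih =>
    intro a
    by_cases h : n < 10
    · rw [toDigits_small h]
      have hd : (Nat.digitChar n).toNat - 48 = n := by interval_cases n <;> rfl
      simp [List.foldl, hd]
    · rw [Nat.not_lt] at h
      rw [toDigits_step h]
      have hlt : n / 10 < n := Nat.div_lt_self (by omega) (by omega)
      rw [List.foldl_append, ih (n / 10) hlt a]
      have hd : (Nat.digitChar (n % 10)).toNat - 48 = n % 10 := by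
        have : n % 10 < 10 := Nat.mod_lt _ (by omega)
        interval_cases h' : n % 10 <;> rfl
      simp [List.foldl, hd, List.length_append, pow_succ]
      ring_nf
      omega

lemma digitsVal_toDigits (n : Nat) : digitsVal (Nat.toDigits 10 n) = n := by
  have := digitsVal_foldl_toDigits n 0
  simpa [digitsVal] using this

lemma toDigits_injective {m n : Nat} (h : Nat.toDigits 10 m = Nat.toDigits 10 n) : m = n := by
  have := digitsVal_toDigits m
  rw [h, digitsVal_toDigits] at this
  omega

lemma toStr_injective_pos {i j : Int} (hi : 1 ≤ i) (hj : 1 ≤ j)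
    (h : PySem.Int.toStr i = PySem.Int.toStr j) : i = j := by
  have hlist : PySem.Int.toChars i = PySem.Int.toChars j := by
    have := congrArg String.toList h
    simpa [PySem.Int.toStr] using this
  simp only [PySem.Int.toChars, if_neg (by omega : ¬ i < 0), if_neg (by omega : ¬ j < 0)] at hlist
  have := toDigits_injective hlist
  omega

-- ---- the dict built by A's first loop is exactly the enumerated association list ----

lemma gradesBuild_items : ∀ (notas : List Int) (d : PySem.Dict String Int) (i : Int),
    1 ≤ i → (∀ j : Int, i ≤ j → d.contains (PySem.Int.toStr j) = false) →
    (gradesBuild d i notas).items = d.items ++ enumPairs i notas := by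
  intro notas
  induction notas with
  | nil => intro d i _ _; simp [gradesBuild, enumPairs]
  | cons nota rest ih =>
    intro d i hi hfresh
    simp only [gradesBuild, enumPairs]
    rw [ih (d.insert (PySem.Int.toStr i) nota) (i + 1) (by omega)]
    · rw [PySem.Dict.items_insert_of_not_contains _ nota (hfresh i (le_refl i))]
      simp
    · intro j hj
      rw [PySem.Dict.contains_insert]
      have hne : PySem.Int.toStr j ≠ PySem.Int.toStr i := by
        intro he
        have := toStr_injective_pos (by omega) hi he
        omega
      simp [hne, hfresh j (by omega)]

lemma enumPairs_snd : ∀ (notas : List Int) (i : Int),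
    (enumPairs i notas).map (·.2) = notas := by
  intro notas
  induction notas with
  | nil => intro i; simp [enumPairs]
  | cons n r ih => intro i; simp [enumPairs, ih]

-- ---- A's scan is find?-of-the-max over the pairs ----

lemma gradesScan_find : ∀ (pairs : List (String × Int)) (d : PySem.Dict String Int) (m : Int),
    PySem.List.max? (PySem.Dict.values d) (fun v => v) = some m →
    gradesScan d pairs = ((pairs.find? (fun p => p.2 == m)).map (fun p => fmtA p.1 p.2)) := by
  intro pairs
  induction pairs with
  | nil => intro d m _; simp [gradesScan]
  | cons p rest ih =>
    intro d m hm
    obtain ⟨aluno, nota⟩ := p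
    simp only [gradesScan, hm, List.find?]
    by_cases h : nota = m
    · simp [h]
    · have hb : (nota == m) = false := by simp [h]
      simp [hb, ih d m hm]

-- ---- B's loop is find?-of-the-max over the pairs ----

lemma gradesAltLoop_some : ∀ (r : List Int) (i : Int) (a : String) (b : Int),
    gradesAltLoop (some (a, b)) i r =
      ((a, b) :: enumPairs i r).find? (fun p => p.2 == r.foldl max b) := by
  intro r
  induction r with
  | nil => intro i a b; simp [gradesAltLoop, List.find?]
  | cons x r' ih =>
    intro i a b
    simp only [gradesAltLoop, enumPairs, List.foldl]
    by_cases hx : b < x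
    · simp only [if_pos hx]
      rw [ih]
      have hmax : max b x = x := by omega
      rw [hmax]
      have hxle : x ≤ r'.foldl max x := (PySem.List.le_foldl_max r' x).1
      have hbne : (b == r'.foldl max x) = false := by simp only [beq_eq_false_iff_ne, ne_eq]; omega
      simp only [List.find?, hbne]
    · simp only [if_neg hx]
      rw [ih]
      have hmax : max b x = b := by omega
      rw [hmax]
      have hble : b ≤ r'.foldl max b := (PySem.List.le_foldl_max r' b).1
      by_cases hb : b = r'.foldl max b
      · simp [List.find?, ← hb]
      · have hbne : (b == r'.foldl max b) = false := by simp [hb]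
        have hxne : (x == r'.foldl max b) = false := by
          simp only [beq_eq_false_iff_ne, ne_eq]; omega
        simp only [List.find?, hbne, hxne]

-- ===== VERDICT (by name: the statement is the Claim_ definition above) =====
theorem grades_spec : Claim_equal_grades := by
  intro notas _
  unfold Spec_grades
  cases notas with
  | nil => rfl
  | cons x r =>
    -- A side
    have hitems : (gradesBuild PySem.Dict.empty 1 (x :: r)).items = enumPairs 1 (x :: r) := by
      rw [gradesBuild_items (x :: r) PySem.Dict.empty 1 (by omega)
        (fun j _ => PySem.Dict.contains_empty _)]
      rfl
    have hvals : PySem.Dict.values (gradesBuild PySem.Dict.empty 1 (x :: r)) = x :: r := by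
      show (gradesBuild PySem.Dict.empty 1 (x :: r)).items.map (·.2) = x :: r
      rw [hitems, enumPairs_snd]
    have hmax : PySem.List.max? (PySem.Dict.values (gradesBuild PySem.Dict.empty 1 (x :: r)))
        (fun v => v) = some (r.foldl max x) := by
      rw [hvals]; exact PySem.List.max?_id_cons x r
    have hA : grades (x :: r) =
        ((enumPairs 1 (x :: r)).find? (fun p => p.2 == r.foldl max x)).map
          (fun p => fmtA p.1 p.2) := by
      show gradesScan _ (gradesBuild PySem.Dict.empty 1 (x :: r)).items = _
      rw [gradesScan_find _ _ _ hmax, hitems]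
    -- B side
    have hB : gradesAltLoop none 1 (x :: r) =
        (enumPairs 1 (x :: r)).find? (fun p => p.2 == r.foldl max x) := by
      show gradesAltLoop (some (PySem.Int.toStr 1, x)) 2 r = _
      rw [gradesAltLoop_some]
      rfl
    rw [hA]
    unfold grades_alt
    rw [hB]
    cases hfind : (enumPairs 1 (x :: r)).find? (fun p => p.2 == r.foldl max x) with
    | none => rfl
    | some p => rfl
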